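-- pv_equiv track=rewrite | github.com/owlrana/cpp | rahulrana/leetcode/#041 Compare Strings by Frequency of the Smallest Character/v41.1.py | f
-- ===== SOURCE A (Python) =====
-- def f(word):
--     minimum = 130 # anything greater than normal english lowercases
--     for char in word:
--         if ord(char) < minimum:
--             minimum = ord(char)
--     frequency = 0
--     for i in range(len(word)):
--         if word[i] == chr(minimum):
--             frequency += 1
--     return frequency
-- ===== SOURCE B (Python) =====
-- def f(word):
--     minimum = 130
--     frequency = 0
--     for char in word:
--         c = ord(char)
--         if c < minimum:
--             minimum = c
--             frequency = 1
--         elif c == minimum: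
--             frequency += 1
--     return frequency
-- ===== Notes on version B (the rewrite author's own statement) =====
-- stated objective: faster
-- what changed: Single pass maintaining the running minimum together with its count (reset count to 1 on a new minimum), instead of one pass to find the minimum and a second indexed re-scan to count it.
import Mathlib
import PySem

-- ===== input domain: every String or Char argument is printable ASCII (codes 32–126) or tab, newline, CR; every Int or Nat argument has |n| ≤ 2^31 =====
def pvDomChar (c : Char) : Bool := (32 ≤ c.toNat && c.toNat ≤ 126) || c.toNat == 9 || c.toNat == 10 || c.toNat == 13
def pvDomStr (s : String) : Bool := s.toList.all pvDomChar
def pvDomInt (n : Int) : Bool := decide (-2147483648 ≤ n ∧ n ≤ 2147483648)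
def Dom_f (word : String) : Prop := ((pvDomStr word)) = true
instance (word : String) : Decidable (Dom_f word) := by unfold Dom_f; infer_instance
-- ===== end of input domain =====

-- B is an alternative single-pass decomposition: it keeps the running minimum and its
-- frequency together, instead of A's min pass followed by a counting re-scan.

-- ===== PORT A =====
-- first loop: minimum = 130; for char in word: if ord(char) < minimum: minimum = ord(char)
def fMinLoop (l : List Char) (minimum : Int) : Int :=
  l.foldl (fun m c => if (c.toNat : Int) < m then (c.toNat : Int) else m) minimum

-- second loop: frequency = 0; for each position, if word[i] == chr(minimum): frequency += 1
def fCountLoop (l : List Char) (minimum : Int) (frequency : Int) : Int :=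
  l.foldl (fun freq c => if c = Char.ofNat minimum.toNat then freq + 1 else freq) frequency

def f (word : String) : Int :=
  let minimum := fMinLoop word.toList 130
  fCountLoop word.toList minimum 0

-- ===== PORT B =====
-- one loop carrying (minimum, frequency)
def fAltLoop (l : List Char) (st : Int × Int) : Int × Int :=
  l.foldl (fun st c =>
    if (c.toNat : Int) < st.1 then ((c.toNat : Int), 1)
    else if (c.toNat : Int) = st.1 then (st.1, st.2 + 1)
    else st) st

def f_alt (word : String) : Int := (fAltLoop word.toList (130, 0)).2

-- ===== PRECONDITION & SPEC =====
def Spec_f (word : String) (out : Int) : Prop := out = f_alt word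
instance (word : String) (out : Int) : Decidable (Spec_f word out) := by unfold Spec_f; infer_instance

-- ===== CLAIM (what is proved, stated in full; the proofs are below) =====
def Claim_equal_f : Prop := ∀ (word : String), Dom_f word → Spec_f word (f word)

-- ===== LEMMAS AND PROOFS =====

lemma fMinLoop_le (l : List Char) (m : Int) : fMinLoop l m ≤ m := by
  induction l generalizing m with
  | nil => simp [fMinLoop]
  | cons c t ih =>
      simp only [fMinLoop, List.foldl_cons] at *
      split_ifs with h
      · exact le_trans (ih _) (le_of_lt h)
      · exact ih m

lemma fMinLoop_nonneg (l : List Char) (m : Int) (hm : 0 ≤ m) : 0 ≤ fMinLoop l m := by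
  induction l generalizing m with
  | nil => simpa [fMinLoop]
  | cons c t ih =>
      simp only [fMinLoop, List.foldl_cons] at *
      split_ifs with h
      · exact ih _ (by positivity)
      · exact ih m hm

-- comparing with chr(minimum) is comparing code points, for minimum in [0, 130]
lemma char_eq_ofNat (c : Char) (m : Int) (h0 : 0 ≤ m) (h1 : m ≤ 130) :
    (c = Char.ofNat m.toNat) ↔ ((c.toNat : Int) = m) := by
  have hv : (Char.ofNat m.toNat).toNat = m.toNat := by
    simp [Char.ofNat, Char.ofNatAux, Nat.isValidChar, (by omega : m.toNat < 55296)]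
  constructor
  · intro h; rw [h, hv]; omega
  · intro h
    have h2 : c.toNat = (Char.ofNat m.toNat).toNat := by omega
    exact Char.ext (UInt32.toNat_inj.mp h2)

-- counting with a nonzero start just shifts the result
lemma count_shift (l : List Char) (m k : Int) :
    l.foldl (fun freq c => if (c.toNat : Int) = m then freq + 1 else freq) k
      = k + l.foldl (fun freq c => if (c.toNat : Int) = m then freq + 1 else freq) 0 := by
  induction l generalizing k with
  | nil => simp
  | cons c t ih =>
      simp only [List.foldl_cons]
      rw [ih, ih (if (c.toNat : Int) = m then (0:Int) + 1 else 0)]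
      split_ifs <;> ring

lemma fCountLoop_eq (l : List Char) (m k : Int) (h0 : 0 ≤ m) (h1 : m ≤ 130) :
    fCountLoop l m k = l.foldl (fun freq c => if (c.toNat : Int) = m then freq + 1 else freq) k := by
  induction l generalizing k with
  | nil => rfl
  | cons c t ih =>
      simp only [fCountLoop, List.foldl_cons] at *
      rw [show (if c = Char.ofNat m.toNat then k + 1 else k)
            = (if (c.toNat : Int) = m then k + 1 else k) by
            simp [char_eq_ofNat c m h0 h1]]
      exact ih _

-- the single-pass invariant: B's state is (running min, count of that min so far)
lemma fAltLoop_eq (l : List Char) (m k : Int) :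
    fAltLoop l (m, k) =
      (fMinLoop l m,
       (if fMinLoop l m = m then k else 0)
         + l.foldl (fun freq c => if (c.toNat : Int) = fMinLoop l m then freq + 1 else freq) 0) := by
  induction l generalizing m k with
  | nil => simp [fAltLoop, fMinLoop]
  | cons c t ih =>
      have hmin : ∀ m', fMinLoop (c :: t) m'
          = fMinLoop t (if (c.toNat : Int) < m' then (c.toNat : Int) else m') := fun _ => rfl
      have hstep : fAltLoop (c :: t) (m, k)
          = fAltLoop t (if (c.toNat : Int) < m then ((c.toNat : Int), 1)
              else if (c.toNat : Int) = m then (m, k + 1) else (m, k)) := rfl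
      by_cases h1 : (c.toNat : Int) < m
      · rw [hstep, if_pos h1, ih, hmin, if_pos h1]
        set M := fMinLoop t (c.toNat : Int) with hM
        have hle : M ≤ (c.toNat : Int) := fMinLoop_le t _
        have hne : M ≠ m := by omega
        rw [List.foldl_cons, if_neg hne]
        by_cases h2 : M = (c.toNat : Int)
        · rw [if_pos h2, if_pos (by omega : (c.toNat : Int) = M)]
          rw [count_shift t M ((0:Int)+1)]
          simp only [Prod.mk.injEq, true_and]
          ring
        · rw [if_neg h2, if_neg (by omega : ¬ (c.toNat : Int) = M)]
      · by_cases h2 : (c.toNat : Int) = m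
        · rw [hstep, if_neg h1, if_pos h2, ih, hmin, if_neg h1]
          set M := fMinLoop t m with hM
          have hle : M ≤ m := fMinLoop_le t _
          rw [List.foldl_cons]
          by_cases h3 : M = m
          · rw [if_pos h3, if_pos h3, if_pos (by omega : (c.toNat : Int) = M)]
            rw [count_shift t M ((0:Int)+1)]
            simp only [Prod.mk.injEq, true_and]
            ring
          · rw [if_neg h3, if_neg h3, if_neg (by omega : ¬ (c.toNat : Int) = M)]
        · rw [hstep, if_neg h1, if_neg h2, ih, hmin, if_neg h1]
          set M := fMinLoop t m with hM
          have hle : M ≤ m := fMinLoop_le t _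
          rw [List.foldl_cons, if_neg (by omega : ¬ (c.toNat : Int) = M)]

lemma f_eq_f_alt (word : String) : f word = f_alt word := by
  unfold f f_alt
  rw [fAltLoop_eq]
  have h0 : (0 : Int) ≤ fMinLoop word.toList 130 := fMinLoop_nonneg _ _ (by norm_num)
  have h1 : fMinLoop word.toList 130 ≤ 130 := fMinLoop_le _ _
  rw [fCountLoop_eq _ _ _ h0 h1]
  by_cases h : fMinLoop word.toList 130 = 130 <;> simp [h]

-- ===== VERDICT (by name: the statement is the Claim_ definition above) =====
theorem f_spec : Claim_equal_f := by
  intro word _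
  unfold Spec_f
  exact f_eq_f_alt word
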